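-- pv_equiv track=rewrite | github.com/inesmarcal/TI_Project-Compression_Of_Files | src/Delta_Encoding/Delta_Encoding.py | ocorrencias
-- ===== SOURCE A (Python) =====
-- def ocorrencias(fonte, alfabeto):
--     ocorrencias = dict()
--     for alf in alfabeto:
--         ocorrencias.update({alf: 0})
--     for i in fonte:
--         if (i in ocorrencias.keys()):
--             ocorrencias[i] += 1
--     return ocorrencias
-- ===== SOURCE B (Python) =====
-- def ocorrencias(fonte, alfabeto):
--     return {alf: fonte.count(alf) for alf in alfabeto}
-- ===== Notes on version B (the rewrite author's own statement) =====
-- stated objective: simpler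
-- what changed: B drops the counting dict entirely: for each alphabet symbol it counts its occurrences with a separate list.count scan of the source (nested scans), instead of scanning the source once while conditionally incrementing a pre-seeded zero dict.
import Mathlib
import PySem

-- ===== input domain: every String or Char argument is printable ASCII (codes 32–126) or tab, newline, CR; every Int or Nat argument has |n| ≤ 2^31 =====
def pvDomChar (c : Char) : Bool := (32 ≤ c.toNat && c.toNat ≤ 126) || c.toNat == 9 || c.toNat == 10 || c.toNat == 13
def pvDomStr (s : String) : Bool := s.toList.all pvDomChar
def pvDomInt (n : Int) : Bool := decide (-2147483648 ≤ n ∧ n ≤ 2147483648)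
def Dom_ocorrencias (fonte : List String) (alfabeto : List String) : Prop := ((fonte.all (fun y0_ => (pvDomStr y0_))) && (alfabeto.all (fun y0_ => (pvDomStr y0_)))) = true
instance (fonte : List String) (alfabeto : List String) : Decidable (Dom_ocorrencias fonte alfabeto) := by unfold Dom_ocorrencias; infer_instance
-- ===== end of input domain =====

-- B drops the counting dict: each alphabet symbol is counted by a separate list.count
-- scan of the source (simpler, one comprehension; no per-element dict updates).

-- ===== PORT A =====
def ocorrencias (fonte : List String) (alfabeto : List String) : List (String × Int) :=
  -- ocorrencias = dict(); for alf in alfabeto: ocorrencias.update({alf: 0})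
  let d0 : PySem.Dict String Int :=
    alfabeto.foldl (fun d alf => d.insert alf 0) PySem.Dict.empty
  -- for i in fonte: if i in ocorrencias.keys(): ocorrencias[i] += 1
  let d : PySem.Dict String Int :=
    fonte.foldl (fun d i => if d.contains i then d.modify i 0 (· + 1) else d) d0
  d.items

-- ===== PORT B =====
def ocorrencias_alt (fonte : List String) (alfabeto : List String) : List (String × Int) :=
  -- {alf: fonte.count(alf) for alf in alfabeto}
  (alfabeto.foldl (fun d alf => d.insert alf (PySem.List.count fonte alf : Int))
    PySem.Dict.empty).items

-- ===== PRECONDITION & SPEC =====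
def Spec_ocorrencias (fonte : List String) (alfabeto : List String) (out : List (String × Int)) : Prop := out = ocorrencias_alt fonte alfabeto
instance (fonte : List String) (alfabeto : List String) (out : List (String × Int)) : Decidable (Spec_ocorrencias fonte alfabeto out) := by unfold Spec_ocorrencias; infer_instance

-- ===== CLAIM (what is proved, stated in full; the proofs are below) =====
def Claim_equal_ocorrencias : Prop := ∀ (fonte : List String) (alfabeto : List String), Dom_ocorrencias fonte alfabeto → Spec_ocorrencias fonte alfabeto (ocorrencias fonte alfabeto)

-- ===== LEMMAS AND PROOFS =====

-- the zero-seeding loop leaves every lookup (with default 0) at 0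
theorem getD_fold_insert_zero (l : List String) (d : PySem.Dict String Int) (k : String)
    (h : d.getD k 0 = 0) :
    (l.foldl (fun d a => d.insert a (0 : Int)) d).getD k 0 = 0 := by
  induction l generalizing d with
  | nil => simpa using h
  | cons x l ih =>
    simp only [List.foldl_cons]
    exact ih _ (by rw [PySem.Dict.getD_insert]; split <;> simp [h])

-- the guarded increment loop never changes the key set
theorem keys_fold_guarded (l : List String) (d : PySem.Dict String Int) :
    (l.foldl (fun d i => if d.contains i then d.modify i 0 (· + 1) else d) d).keys = d.keys := by
  induction l generalizing d with
  | nil => rfl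
  | cons x l ih =>
    simp only [List.foldl_cons]
    rw [ih]
    by_cases h : d.contains x = true
    · rw [if_pos h, PySem.Dict.keys_modify, PySem.Dict.keys_insert_of_contains _ _ h]
    · rw [if_neg h]

-- value of the guarded increment loop at any key
theorem getD_fold_guarded (l : List String) (d : PySem.Dict String Int) (k : String) :
    (l.foldl (fun d i => if d.contains i then d.modify i 0 (· + 1) else d) d).getD k 0 =
      if k ∈ d.keys then d.getD k 0 + l.count k else d.getD k 0 := by
  induction l generalizing d with
  | nil => simp
  | cons x l ih =>
    simp only [List.foldl_cons]
    rw [ih]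
    by_cases hc : d.contains x = true
    · rw [if_pos hc]
      have hkeys : (d.modify x 0 (· + 1)).keys = d.keys := by
        rw [PySem.Dict.keys_modify, PySem.Dict.keys_insert_of_contains _ _ hc]
      rw [hkeys]
      by_cases hk : k ∈ d.keys
      · rw [if_pos hk, if_pos hk, PySem.Dict.getD_modify]
        by_cases hx : k = x
        · subst hx; simp; ring
        · rw [if_neg hx]; simp [Ne.symm, hx]
      · rw [if_neg hk, if_neg hk, PySem.Dict.getD_modify]
        have hx : k ≠ x := by
          intro e; subst e
          exact hk ((PySem.Dict.contains_iff_mem_keys _ _).mp hc)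
        rw [if_neg hx]
    · rw [if_neg hc]
      by_cases hk : k ∈ d.keys
      · have hx : k ≠ x := by
          intro e; subst e
          exact hc ((PySem.Dict.contains_iff_mem_keys _ _).mpr hk)
        rw [if_pos hk, if_pos hk]
        simp [Ne.symm, hx]
      · rw [if_neg hk, if_neg hk]

-- value of B's projection loop at any key already in the alphabet list
theorem getD_fold_project (l : List String) (d : PySem.Dict String Int) (c : String → Int) (k : String) :
    (l.foldl (fun d a => d.insert a (c a)) d).getD k 0 =
      if k ∈ l then c k else d.getD k 0 := by
  induction l generalizing d with
  | nil => simp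
  | cons x l ih =>
    simp only [List.foldl_cons]
    rw [ih]
    by_cases hl : k ∈ l
    · simp [hl]
    · rw [if_neg hl, PySem.Dict.getD_insert]
      by_cases hx : k = x
      · subst hx; simp
      · simp [hx, hl]

-- ===== VERDICT (by name: the statement is the Claim_ definition above) =====
theorem ocorrencias_spec : Claim_equal_ocorrencias := by
  intro fonte alfabeto _
  show ocorrencias fonte alfabeto = ocorrencias_alt fonte alfabeto
  unfold ocorrencias ocorrencias_alt
  simp only []
  set d0 : PySem.Dict String Int :=
    alfabeto.foldl (fun d alf => d.insert alf 0) PySem.Dict.empty with hd0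
  set dA : PySem.Dict String Int :=
    fonte.foldl (fun d i => if d.contains i then d.modify i 0 (· + 1) else d) d0 with hdA
  set dB : PySem.Dict String Int :=
    alfabeto.foldl (fun d alf => d.insert alf (PySem.List.count fonte alf : Int))
      PySem.Dict.empty with hdB
  have hk0 : d0.keys = PySem.Set.ofList alfabeto := by
    rw [hd0]
    have := PySem.Dict.keys_foldl_insert alfabeto (fun _ _ => (0 : Int)) PySem.Dict.empty
    simpa [PySem.Set.update_nil_left] using this
  have hkA : dA.keys = PySem.Set.ofList alfabeto := by
    rw [hdA, keys_fold_guarded, hk0]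
  have hkB : dB.keys = PySem.Set.ofList alfabeto := by
    rw [hdB]
    have := PySem.Dict.keys_foldl_insert alfabeto
      (fun (_ : PySem.Dict String Int) a => (PySem.List.count fonte a : Int)) PySem.Dict.empty
    simpa [PySem.Set.update_nil_left] using this
  have hnA : dA.keys.Nodup := by rw [hkA]; exact PySem.Set.nodup_ofList _
  have hnB : dB.keys.Nodup := by rw [hkB]; exact PySem.Set.nodup_ofList _
  rw [PySem.Dict.items_eq_map_keys dA hnA 0, PySem.Dict.items_eq_map_keys dB hnB 0, hkA, hkB]
  apply List.map_congr_left
  intro k hk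
  have hka : k ∈ alfabeto := (PySem.Set.mem_ofList _ _).mp hk
  have h1 : dA.getD k 0 = (fonte.count k : Int) := by
    rw [hdA, getD_fold_guarded, hk0, if_pos hk,
        getD_fold_insert_zero alfabeto PySem.Dict.empty k (by simp)]
    simp
  have h2 : dB.getD k 0 = (fonte.count k : Int) := by
    rw [hdB, getD_fold_project, if_pos hka, PySem.List.count_eq]
  rw [h1, h2]
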